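-- pv_equiv track=rewrite | github.com/JoshuaOliphant/herald | src/herald/heartbeat/reader.py | _has_meaningful_content
-- ===== SOURCE A (Python) =====
-- def _has_meaningful_content(content: str) -> bool:
--     """
--     Check if markdown content has meaningful text beyond headers and whitespace.
--
--     Args:
--         content: The markdown content to check
--
--     Returns:
--         True if content has non-header, non-whitespace text
--         False if content is empty, only whitespace, or only markdown headers
--     """
--     # Split into lines and check each one
--     lines = content.split("\n")
--
--     for line in lines:
--         stripped = line.strip()
--
--         # Skip empty lines
--         if not stripped:
--             continue
--
--         # Skip markdown headers (lines starting with #)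
--         if stripped.startswith("#"):
--             continue
--
--         # Found a line with meaningful content
--         return True
--
--     # No meaningful content found
--     return False
-- ===== SOURCE B (Python) =====
-- def _has_meaningful_content(content: str) -> bool:
--     # Single pass over characters: a tiny state machine instead of split/strip per line.
--     # skipping == True means we are inside a header line ('#' seen first) and wait for '\n'.
--     skipping = False
--     for ch in content:
--         if ch == "\n":
--             skipping = False
--         elif skipping:
--             pass
--         elif ch.isspace():
--             pass
--         elif ch == "#":
--             skipping = True
--         else:
--             return True
--     return False
-- ===== Notes on version B (the rewrite author's own statement) =====
-- stated objective: alternative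
-- what changed: Replaced the split-into-lines/strip/startswith per-line loop by a single character-level state machine that scans the string once with one boolean state (inside-a-header), never building the line list or stripped copies.
import Mathlib
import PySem

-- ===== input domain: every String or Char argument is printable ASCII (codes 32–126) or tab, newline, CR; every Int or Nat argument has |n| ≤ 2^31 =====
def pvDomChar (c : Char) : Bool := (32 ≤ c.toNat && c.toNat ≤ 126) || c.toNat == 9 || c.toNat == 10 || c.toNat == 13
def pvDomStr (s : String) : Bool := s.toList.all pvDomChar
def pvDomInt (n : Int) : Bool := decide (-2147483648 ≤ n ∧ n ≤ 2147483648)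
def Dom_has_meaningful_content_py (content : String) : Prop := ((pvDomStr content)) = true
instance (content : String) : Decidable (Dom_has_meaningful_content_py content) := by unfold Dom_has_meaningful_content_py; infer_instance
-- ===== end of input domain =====

-- B replaces A's split("\n")/strip()/startswith per-line loop by a single character-level
-- state machine over the string (objective: alternative, same O(n) cost, no line list built).

-- ===== PORT A =====
-- the 'for line in lines' loop of A, as structural recursion over the line list
def hmcLinesLoop : List (List Char) → Bool
  | [] => false
  | line :: rest =>
    let stripped := PySem.Chars.strip line
    if stripped.isEmpty then hmcLinesLoop rest
    else if PySem.Chars.startswith stripped ['#'] then hmcLinesLoop rest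
    else true

def has_meaningful_content_py (content : String) : Bool :=
  hmcLinesLoop (PySem.Chars.splitOn content.toList ['\n'])

-- ===== PORT B =====
-- Source B's state machine: 'skipping' = inside a header line, waiting for '\n'
def hmcAltGo : Bool → List Char → Bool
  | _, [] => false
  | skipping, c :: rest =>
    if c = '\n' then hmcAltGo false rest
    else if skipping then hmcAltGo skipping rest
    else if PySem.Chars.isspace c then hmcAltGo skipping rest
    else if c = '#' then hmcAltGo true rest
    else true

def has_meaningful_content_py_alt (content : String) : Bool :=
  hmcAltGo false content.toList

-- ===== PRECONDITION & SPEC =====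
def Spec_has_meaningful_content_py (content : String) (out : Bool) : Prop := out = has_meaningful_content_py_alt content
instance (content : String) (out : Bool) : Decidable (Spec_has_meaningful_content_py content out) := by unfold Spec_has_meaningful_content_py; infer_instance

-- ===== CLAIM (what is proved, stated in full; the proofs are below) =====
def Claim_equal_has_meaningful_content_py : Prop := ∀ (content : String), Dom_has_meaningful_content_py content → Spec_has_meaningful_content_py content (has_meaningful_content_py content)

-- ===== LEMMAS AND PROOFS =====

-- proof-side model of split("\n")
def hmcSplit : List Char → List (List Char)
  | [] => [[]]
  | c :: rest =>
    if c = '\n' then [] :: hmcSplit rest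
    else
      match hmcSplit rest with
      | [] => [[c]]
      | h :: t => (c :: h) :: t

def hmcConsHead (pre : List Char) : List (List Char) → List (List Char)
  | [] => [pre]
  | h :: t => (pre ++ h) :: t

lemma hmcSplit_ne_nil (cs : List Char) : hmcSplit cs ≠ [] := by
  cases cs with
  | nil => simp [hmcSplit]
  | cons c rest =>
    simp only [hmcSplit]
    split <;> simp_all
    split <;> simp_all

lemma hmc_go_succ (n : Nat) (c : Char) (rest cur : List Char) (acc : List (List Char)) :
    PySem.Chars.splitOn.go ['\n'] (n+1) (c::rest) cur acc =
      if c = '\n' then PySem.Chars.splitOn.go ['\n'] n rest [] (cur.reverse :: acc)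
      else PySem.Chars.splitOn.go ['\n'] n rest (c::cur) acc := by
  rcases eq_or_ne c '\n' with h | h
  · simp [PySem.Chars.splitOn.go, List.isPrefixOf, h]
  · simp [PySem.Chars.splitOn.go, List.isPrefixOf, h, Ne.symm h]

lemma hmc_go_spec : ∀ (fuel : Nat) (l cur : List Char) (acc : List (List Char)),
    l.length < fuel →
    PySem.Chars.splitOn.go ['\n'] fuel l cur acc = acc.reverse ++ hmcConsHead cur.reverse (hmcSplit l) := by
  intro fuel
  induction fuel with
  | zero => intro l cur acc h; omega
  | succ n ih =>
    intro l cur acc h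
    cases l with
    | nil =>
      simp [PySem.Chars.splitOn.go, hmcSplit, hmcConsHead]
    | cons c rest =>
      rw [hmc_go_succ]
      have hlen : rest.length < n := by simpa using Nat.lt_of_succ_lt_succ h
      rcases hl : hmcSplit rest with _ | ⟨h1, t⟩
      · exact absurd hl (hmcSplit_ne_nil rest)
      by_cases hc : c = '\n'
      · rw [if_pos hc, ih rest [] (cur.reverse :: acc) hlen]
        subst hc
        simp [hmcSplit, hl, hmcConsHead]
      · rw [if_neg hc, ih rest (c :: cur) acc hlen]
        simp [hmcSplit, hc, hl, hmcConsHead]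

lemma hmc_splitOn_eq (cs : List Char) :
    PySem.Chars.splitOn cs ['\n'] = hmcSplit cs := by
  rw [PySem.Chars.splitOn, hmc_go_spec (cs.length + 1) cs [] [] (by omega)]
  rcases hl : hmcSplit cs with _ | ⟨h, t⟩
  · exact absurd hl (hmcSplit_ne_nil cs)
  · simp [hmcConsHead]

lemma hmc_strip_cons_space {c : Char} (l : List Char) (h : PySem.Chars.isspace c = true) :
    PySem.Chars.strip (c :: l) = PySem.Chars.strip l := by
  simp [PySem.Chars.strip, PySem.Chars.lstrip, h]

lemma hmc_strip_cons_nonspace {c : Char} (l : List Char) (h : PySem.Chars.isspace c = false) :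
    PySem.Chars.strip (c :: l) = c :: PySem.Chars.rstrip l := by
  simp only [PySem.Chars.strip, PySem.Chars.lstrip, PySem.Chars.rstrip,
    List.dropWhile_cons, h, Bool.false_eq_true, if_false, List.reverse_cons,
    List.dropWhile_append]
  split
  · next he =>
    simp only [List.isEmpty_iff] at he
    simp [he]
  · simp

lemma hmc_main (cs : List Char) :
    hmcAltGo false cs = hmcLinesLoop (hmcSplit cs) ∧
    hmcAltGo true cs = hmcLinesLoop (hmcSplit cs).tail := by
  induction cs with
  | nil => simp [hmcAltGo, hmcSplit, hmcLinesLoop, PySem.Chars.strip,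
      PySem.Chars.lstrip, PySem.Chars.rstrip]
  | cons c rest ih =>
    by_cases hnl : c = '\n'
    · subst hnl
      refine ⟨?_, ?_⟩
      · rw [show hmcAltGo false ('\n' :: rest) = hmcAltGo false rest by simp [hmcAltGo],
          ih.1]
        simp [hmcSplit, hmcLinesLoop, PySem.Chars.strip, PySem.Chars.lstrip,
          PySem.Chars.rstrip]
      · rw [show hmcAltGo true ('\n' :: rest) = hmcAltGo false rest by simp [hmcAltGo],
          ih.1]
        simp [hmcSplit]
    · rcases hl : hmcSplit rest with _ | ⟨h', t⟩
      · exact absurd hl (hmcSplit_ne_nil rest)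
      have hsp : hmcSplit (c :: rest) = (c :: h') :: t := by
        simp [hmcSplit, hnl, hl]
      have htrue : hmcAltGo true (c :: rest) = hmcAltGo true rest := by
        simp [hmcAltGo, hnl]
      have htail : hmcAltGo true (c :: rest) = hmcLinesLoop (hmcSplit (c :: rest)).tail := by
        rw [htrue, ih.2, hl, hsp, List.tail_cons, List.tail_cons]
      refine ⟨?_, htail⟩
      by_cases hspace : PySem.Chars.isspace c = true
      · rw [show hmcAltGo false (c :: rest) = hmcAltGo false rest by
            simp [hmcAltGo, hnl, hspace], ih.1, hl, hsp]
        simp only [hmcLinesLoop, hmc_strip_cons_space h' hspace]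
      · have hs := hmc_strip_cons_nonspace h' (by simpa using hspace)
        by_cases hhash : c = '#'
        · subst hhash
          rw [show hmcAltGo false ('#' :: rest) = hmcAltGo true rest by
              simp [hmcAltGo, hspace], ih.2, hl, hsp]
          simp [hmcLinesLoop, hs, PySem.Chars.startswith, List.isPrefixOf]
        · rw [show hmcAltGo false (c :: rest) = true by
              simp [hmcAltGo, hnl, hspace, hhash], hsp]
          simp [hmcLinesLoop, hs, PySem.Chars.startswith, List.isPrefixOf, Ne.symm hhash]

-- ===== VERDICT (by name: the statement is the Claim_ definition above) =====
theorem has_meaningful_content_py_spec : Claim_equal_has_meaningful_content_py := by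
  intro content _
  unfold Spec_has_meaningful_content_py has_meaningful_content_py has_meaningful_content_py_alt
  rw [hmc_splitOn_eq, (hmc_main content.toList).1]
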